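-- pv_equiv track=rewrite | github.com/tech-and-ai/ai2ai-feedback | workspaces/lily_ai_review/backup/auth_backup/auth/middleware.py | _is_public_route
-- ===== SOURCE A (Python) =====
-- def _is_public_route(path: str) -> bool:
--     """
--     Check if a route is public (doesn't require authentication).
--
--     Args:
--         path: The request path
--
--     Returns:
--         True if the route is public, False otherwise
--     """
--     # Special case for /profile and /account/manage - these are never public
--     if path == "/profile" or path == "/account/manage":
--         return False
--
--     public_prefixes = [
--         "/static/",
--         "/auth/login",
--         "/auth/register",
--         "/auth/reset-password",
--         "/auth/verify-email",     # Email verification page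
--         "/auth/verify",           # Email verification callback
--         "/auth/verify-success",   # Email verification success page
--         "/auth/resend-verification", # Resend verification email
--         "/auth/reset-confirmation", # Password reset confirmation
--         "/auth/oauth/google",     # Google OAuth route
--         "/auth/callback",         # OAuth callback route
--         "/",                      # Homepage
--         "/about",
--         "/pricing",
--         "/contact",
--         "/test-profile",          # Test route
--         "/billing/webhook"        # Stripe webhook endpoint - must be public
--     ]
--
--     return any(path.startswith(prefix) for prefix in public_prefixes)
-- ===== SOURCE B (Python) =====
-- def _is_public_route(path: str) -> bool:
--     # Every public prefix in the original list begins with "/", and "/" itself is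
--     # in the list, so "starts with some public prefix" collapses to "starts with /".
--     return path.startswith("/") and path not in ("/profile", "/account/manage")
-- ===== Notes on version B (the rewrite author's own statement) =====
-- stated objective: simpler
-- what changed: The prefix list contains "/" and every other prefix also starts with "/", so the any-over-prefixes loop collapses to a single startswith("/") check plus the two explicit exclusions.
import Mathlib
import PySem

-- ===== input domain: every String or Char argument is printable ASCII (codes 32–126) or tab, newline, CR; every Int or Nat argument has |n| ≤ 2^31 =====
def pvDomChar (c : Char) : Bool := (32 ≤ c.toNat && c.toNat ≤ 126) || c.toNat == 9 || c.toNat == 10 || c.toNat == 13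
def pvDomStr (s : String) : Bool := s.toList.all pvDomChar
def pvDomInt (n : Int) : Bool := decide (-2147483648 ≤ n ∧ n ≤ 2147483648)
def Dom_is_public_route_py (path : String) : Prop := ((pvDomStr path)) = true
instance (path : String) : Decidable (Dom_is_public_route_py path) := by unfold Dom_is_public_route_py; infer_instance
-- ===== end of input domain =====

-- B collapses A's any-over-prefixes loop to a single startswith("/") check (every listed prefix starts with "/", and "/" itself is listed); objective: simpler.


-- ===== PORT A =====
def pvPublicPrefixes : List String :=
  ["/static/", "/auth/login", "/auth/register", "/auth/reset-password",
   "/auth/verify-email", "/auth/verify", "/auth/verify-success",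
   "/auth/resend-verification", "/auth/reset-confirmation",
   "/auth/oauth/google", "/auth/callback", "/", "/about", "/pricing",
   "/contact", "/test-profile", "/billing/webhook"]

def is_public_route_py (path : String) : Bool :=
  if path = "/profile" ∨ path = "/account/manage" then false
  else pvPublicPrefixes.any (fun pfx => PySem.Str.startswith path pfx)

-- ===== PORT B =====
def is_public_route_py_alt (path : String) : Bool :=
  PySem.Str.startswith path "/" && !(path = "/profile" ∨ path = "/account/manage" : Bool)

-- ===== PRECONDITION & SPEC =====
def Spec_is_public_route_py (path : String) (out : Bool) : Prop := out = is_public_route_py_alt path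
instance (path : String) (out : Bool) : Decidable (Spec_is_public_route_py path out) := by unfold Spec_is_public_route_py; infer_instance

-- ===== CLAIM (what is proved, stated in full; the proofs are below) =====
def Claim_equal_is_public_route_py : Prop := ∀ (path : String), Dom_is_public_route_py path → Spec_is_public_route_py path (is_public_route_py path)

-- ===== LEMMAS AND PROOFS =====

-- the collapse: some listed prefix is a prefix of path iff "/" is
theorem any_prefix_eq_slash (path : String) :
    pvPublicPrefixes.any (fun p => PySem.Str.startswith path p)
      = PySem.Str.startswith path "/" := by
  simp only [PySem.Str.startswith_eq]
  by_cases h : PySem.Chars.startswith path.toList "/".toList = true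
  · rw [h]
    apply List.any_eq_true.mpr
    exact ⟨"/", by simp [pvPublicPrefixes], h⟩
  · rw [eq_false_of_ne_true h]
    apply List.any_eq_false.mpr
    intro p hp
    intro hps
    apply h
    rw [PySem.Chars.startswith_iff] at hps ⊢
    refine List.IsPrefix.trans ?_ hps
    fin_cases hp <;> decide

theorem is_public_route_py_spec : Claim_equal_is_public_route_py := by
  intro path _
  unfold Spec_is_public_route_py is_public_route_py is_public_route_py_alt
  by_cases h : path = "/profile" ∨ path = "/account/manage"
  · simp [h]
  · rw [if_neg h, any_prefix_eq_slash]
    simp [h]
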